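-- pv_equiv track=rewrite | github.com/andrevka/ICNS_SC2Project | data_reader.py | evaluate
-- ===== SOURCE A (Python) =====
-- def evaluate(game):
--     score = 0
--     pUnits_prev = 9
--     eUnits_prev = 10
--     for frame in game:
--         score_gained, pUnits_prev, eUnits_prev = evaluate_frame(frame, pUnits_prev, eUnits_prev)
--         score += score_gained
--     return score
--
-- def evaluate_frame(frame, pUnits_prev, eUnits_prev):
--     score_gained = 0
--     pUnits = 0
--     eUnits = 0
--     for unit in frame['units']:
--         if unit['alliance'] == 1:
--             pUnits += 1
--         else:
--             eUnits += 1
--     # 5 point for every killed enemy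
--     # Prevents losing points for respawning enemies
--     if eUnits < eUnits_prev:
--         score_gained += 5 * (eUnits_prev - eUnits)
--     # -1 point for every marine lost
--     # Prevents gaining points for extra marines received
--     if pUnits < pUnits_prev:
--         score_gained += pUnits - pUnits_prev
--     pUnits_prev = pUnits
--     eUnits_prev = eUnits
--     return score_gained, pUnits, eUnits
-- ===== SOURCE B (Python) =====
-- def evaluate(game):
--     # Branch-free closed form: the sum of positive drops of a sequence x equals
--     # (x[0] - x[-1] + total_variation(x)) / 2, and the sum of negative steps equals
--     # (x[-1] - x[0] - total_variation(x)) / 2 (telescoping + |.|).  So score =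
--     # 5 * (drops of the enemy-count sequence) + (negative steps of the player sequence).
--     ps = [9] + [sum(1 for u in f['units'] if u['alliance'] == 1) for f in game]
--     es = [10] + [sum(1 for u in f['units'] if u['alliance'] != 1) for f in game]
--     tv_e = sum(abs(a - b) for a, b in zip(es, es[1:]))
--     tv_p = sum(abs(a - b) for a, b in zip(ps, ps[1:]))
--     return 5 * (es[0] - es[-1] + tv_e) // 2 + (ps[-1] - ps[0] - tv_p) // 2
-- ===== Notes on version B (the rewrite author's own statement) =====
-- stated objective: alternative
-- what changed: A threads (score, pUnits_prev, eUnits_prev) through an incremental branching fold; B computes the score branch-free in closed form from the seeded player/enemy count sequences: sum of positive drops = (first - last + total variation)/2, so score = 5*(es[0]-es[-1]+TV(es))//2 + (ps[-1]-ps[0]-TV(ps))//2.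
import Mathlib
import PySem

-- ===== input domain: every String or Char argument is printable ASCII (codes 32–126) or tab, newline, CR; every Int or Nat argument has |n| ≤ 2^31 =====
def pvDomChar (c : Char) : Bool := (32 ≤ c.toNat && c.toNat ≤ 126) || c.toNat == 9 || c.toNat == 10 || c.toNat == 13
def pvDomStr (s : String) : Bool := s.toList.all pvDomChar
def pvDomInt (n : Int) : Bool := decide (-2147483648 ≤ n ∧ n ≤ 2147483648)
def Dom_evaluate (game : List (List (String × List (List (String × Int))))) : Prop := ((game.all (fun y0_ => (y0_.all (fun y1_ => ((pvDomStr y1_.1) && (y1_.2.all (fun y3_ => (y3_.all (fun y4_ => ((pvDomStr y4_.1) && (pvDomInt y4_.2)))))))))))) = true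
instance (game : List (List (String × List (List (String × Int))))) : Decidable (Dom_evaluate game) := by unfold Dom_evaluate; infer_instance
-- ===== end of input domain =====

-- B replaces A's incremental branching fold with a branch-free closed form: sum of positive
-- drops of a sequence = (first - last + total variation)/2 (alternative algorithm, same cost).


-- ===== PORT A =====
-- frame['units'] / unit['alliance'] are first-match assoc-list lookups; the .getD
-- defaults are only reached where Python raises KeyError (excluded by Pre_evaluate).
def evaluate_frame (frame : List (String × List (List (String × Int)))) (pUnits_prev eUnits_prev : Int) : Int × Int × Int :=
  let units := (frame.lookup "units").getD []
  let pe := units.foldl (fun (pe : Int × Int) u =>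
      if (u.lookup "alliance").getD 0 == 1 then (pe.1 + 1, pe.2) else (pe.1, pe.2 + 1)) (0, 0)
  let sg : Int := (if pe.2 < eUnits_prev then 5 * (eUnits_prev - pe.2) else 0)
  let sg := sg + (if pe.1 < pUnits_prev then pe.1 - pUnits_prev else 0)
  (sg, pe.1, pe.2)

def evaluate (game : List (List (String × List (List (String × Int))))) : Int :=
  (game.foldl (fun (st : Int × Int × Int) frame =>
      let r := evaluate_frame frame st.2.1 st.2.2
      (st.1 + r.1, r.2.1, r.2.2)) (0, 9, 10)).1

-- ===== PORT B =====
-- per-frame player count: sum(1 for u in f['units'] if u['alliance'] == 1)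
def pvPCount (frame : List (String × List (List (String × Int)))) : Int :=
  ((((frame.lookup "units").getD []).filter (fun u => (u.lookup "alliance").getD 0 == 1)).length : Int)
-- per-frame enemy count: sum(1 for u in f['units'] if u['alliance'] != 1)
def pvECount (frame : List (String × List (List (String × Int)))) : Int :=
  ((((frame.lookup "units").getD []).filter (fun u => !((u.lookup "alliance").getD 0 == 1))).length : Int)

def evaluate_alt (game : List (List (String × List (List (String × Int))))) : Int :=
  let ps : List Int := 9 :: game.map pvPCount
  let es : List Int := 10 :: game.map pvECount
  -- tv = sum(abs(a - b) for a, b in zip(xs, xs[1:]))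
  let tv_e := (es.zip es.tail).foldl (fun s pr => s + |pr.1 - pr.2|) 0
  let tv_p := (ps.zip ps.tail).foldl (fun s pr => s + |pr.1 - pr.2|) 0
  -- xs[0] / xs[-1] on the (nonempty) lists: head / last
  PySem.Int.floordiv (5 * (es.headD 0 - es.getLastD 0 + tv_e)) 2
    + PySem.Int.floordiv (ps.getLastD 0 - ps.headD 0 - tv_p) 2

-- ===== PRECONDITION & SPEC =====
-- Pre_ excludes exactly the inputs where Python A raises KeyError: a frame without
-- a "units" key, or a unit without an "alliance" key.
def Pre_evaluate (game : List (List (String × List (List (String × Int))))) : Prop :=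
  (game.all (fun frame =>
    match frame.lookup "units" with
    | none => false
    | some us => us.all (fun u => (u.lookup "alliance").isSome))) = true
instance (game : List (List (String × List (List (String × Int))))) : Decidable (Pre_evaluate game) := by unfold Pre_evaluate; infer_instance
def pvWitness_evaluate : (List (List (String × List (List (String × Int))))) :=
  [[("units", [[("alliance", 1)], [("alliance", 4)]])], [("units", [])]]

def Spec_evaluate (game : List (List (String × List (List (String × Int))))) (out : Int) : Prop := out = evaluate_alt game
instance (game : List (List (String × List (List (String × Int))))) (out : Int) : Decidable (Spec_evaluate game out) := by unfold Spec_evaluate; infer_instance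

-- ===== CLAIM (what is proved, stated in full; the proofs are below) =====
def Claim_equal_evaluate : Prop := ∀ (game : List (List (String × List (List (String × Int))))), Dom_evaluate game → Pre_evaluate game → Spec_evaluate game (evaluate game)

-- ===== LEMMAS AND PROOFS =====

-- sum of positive drops over adjacent pairs of a count sequence
def pvP (xs : List Int) : Int :=
  (xs.zip xs.tail).foldl (fun s pr => s + max 0 (pr.1 - pr.2)) 0
-- total variation (B's tv)
def pvTV (xs : List Int) : Int :=
  (xs.zip xs.tail).foldl (fun s pr => s + |pr.1 - pr.2|) 0

lemma foldl_shift (l : List (Int × Int)) (f : Int × Int → Int) (s : Int) :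
    l.foldl (fun a pr => a + f pr) s = s + l.foldl (fun a pr => a + f pr) 0 := by
  induction l generalizing s with
  | nil => simp
  | cons x xs ih => simp only [List.foldl_cons]; rw [ih, ih (0 + f x)]; ring

lemma pvP_cons (a b : Int) (l : List Int) :
    pvP (a :: b :: l) = max 0 (a - b) + pvP (b :: l) := by
  simp only [pvP, List.zip_cons_cons, List.tail_cons, List.foldl_cons]
  rw [foldl_shift]; ring

lemma pvTV_cons (a b : Int) (l : List Int) :
    pvTV (a :: b :: l) = |a - b| + pvTV (b :: l) := by
  simp only [pvTV, List.zip_cons_cons, List.tail_cons, List.foldl_cons]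
  rw [foldl_shift]; ring

-- telescoping + total variation: 2 * (sum of positive drops) = first - last + TV
lemma pvP_closed (xs : List Int) : ∀ h : Int,
    2 * pvP (h :: xs) = h - (h :: xs).getLastD 0 + pvTV (h :: xs) := by
  induction xs with
  | nil => intro h; simp [pvP, pvTV]
  | cons x xs ih =>
    intro h
    rw [pvP_cons, pvTV_cons]
    have := ih x
    have hmax : 2 * max 0 (h - x) = (h - x) + |h - x| := by
      rcases le_total h x with h' | h'
      · rw [max_eq_left (by omega), abs_of_nonpos (by omega)]; ring
      · rw [max_eq_right (by omega), abs_of_nonneg (by omega)]; ring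

    have hlast : (h :: x :: xs).getLastD 0 = (x :: xs).getLastD 0 := by
      simp
    rw [hlast]; omega

lemma floordiv_two_mul (x : Int) : PySem.Int.floordiv (2 * x) 2 = x :=
  (PySem.Int.floordiv_eq_iff_of_pos (by norm_num)).2 ⟨by omega, by omega⟩

-- A's per-unit counting fold equals the two filter counts
lemma count_units (units : List (List (String × Int))) (a b : Int) :
    units.foldl (fun (pe : Int × Int) u =>
      if (u.lookup "alliance").getD 0 == 1 then (pe.1 + 1, pe.2) else (pe.1, pe.2 + 1)) (a, b)
    = (a + ((units.filter (fun u => (u.lookup "alliance").getD 0 == 1)).length : Int),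
       b + ((units.filter (fun u => !((u.lookup "alliance").getD 0 == 1))).length : Int)) := by
  induction units generalizing a b with
  | nil => simp
  | cons u us ih =>
    by_cases h : ((u.lookup "alliance").getD 0 == 1) = true
    · rw [List.foldl_cons, if_pos h, ih]
      simp only [List.filter_cons, h, if_true, Bool.not_true, if_false, List.length_cons,
        Prod.mk.injEq, Bool.false_eq_true]
      constructor <;> push_cast <;> ring
    · rw [List.foldl_cons, if_neg h, ih]
      simp only [List.filter_cons, h, Bool.not_false, if_true, if_false, List.length_cons,
        Prod.mk.injEq, Bool.false_eq_true]
      constructor <;> push_cast <;> ring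

lemma frame_eq (frame : List (String × List (List (String × Int)))) (pp ep : Int) :
    evaluate_frame frame pp ep =
      (5 * max 0 (ep - pvECount frame) - max 0 (pp - pvPCount frame),
       pvPCount frame, pvECount frame) := by
  simp only [evaluate_frame, pvPCount, pvECount, count_units]
  simp only [zero_add]
  congr 1
  rcases le_total ep (((((frame.lookup "units").getD []).filter
      (fun u => !((u.lookup "alliance").getD 0 == 1))).length : Int)) with h | h <;>
  rcases le_total pp (((((frame.lookup "units").getD []).filter
      (fun u => (u.lookup "alliance").getD 0 == 1)).length : Int)) with h' | h' <;>
  · split_ifs <;> rw [show ∀ x y : Int, max x y = if x ≤ y then y else x from fun x y => by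
      rcases le_total x y with h'' | h'' <;> simp [*] <;> omega] <;>
    (split_ifs <;> omega)

lemma main_fold (gs : List (List (String × List (List (String × Int))))) :
    ∀ (s pp ep : Int),
      (gs.foldl (fun (st : Int × Int × Int) frame =>
          let r := evaluate_frame frame st.2.1 st.2.2
          (st.1 + r.1, r.2.1, r.2.2)) (s, pp, ep)).1
      = s + 5 * pvP (ep :: gs.map pvECount) - pvP (pp :: gs.map pvPCount) := by
  induction gs with
  | nil => intro s pp ep; simp [pvP]
  | cons f fs ih =>
    intro s pp ep
    simp only [List.map_cons, List.foldl_cons]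
    rw [ih, frame_eq, pvP_cons, pvP_cons]
    ring

-- ===== VERDICT (by name: the statement is the Claim_ definition above) =====
theorem evaluate_spec : Claim_equal_evaluate := by
  intro game _ _
  show evaluate game = evaluate_alt game
  have hA : evaluate game
      = 5 * pvP (10 :: game.map pvECount) - pvP (9 :: game.map pvPCount) := by
    simpa using main_fold game 0 9 10
  have he := pvP_closed (game.map pvECount) 10
  have hp := pvP_closed (game.map pvPCount) 9
  simp only [evaluate_alt, List.headD, List.tail_cons]
  rw [show (5 * ((10:Int) - ((10:Int) :: game.map pvECount).getLastD 0
        + ((((10:Int) :: game.map pvECount).zip (game.map pvECount)).foldl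
            (fun s pr => s + |pr.1 - pr.2|) 0)))
      = 2 * (5 * pvP (10 :: game.map pvECount)) from by
    simp only [pvTV, List.tail_cons] at he; omega]
  rw [show ((((9:Int) :: game.map pvPCount).getLastD 0) - 9
        - ((((9:Int) :: game.map pvPCount).zip (game.map pvPCount)).foldl
            (fun s pr => s + |pr.1 - pr.2|) 0))
      = 2 * (-(pvP (9 :: game.map pvPCount))) from by
    simp only [pvTV, List.tail_cons] at hp; omega]
  rw [floordiv_two_mul, floordiv_two_mul, hA]
  ring
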